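-- pv_equiv track=rewrite | github.com/graziul/vcite | tools/parsers/latex_parser.py | _delete_call
-- ===== SOURCE A (Python) =====
-- def _find_matching_brace(s: str, open_pos: int) -> int:
--     """Return the index of the matching ``}`` for a ``{`` at ``open_pos``.
--
--     Respects backslash-escaped ``\\{`` and ``\\}``. Returns ``-1`` if no
--     match is found before end-of-string.
--     """
--     if open_pos >= len(s) or s[open_pos] != "{":
--         return -1
--     depth = 1
--     i = open_pos + 1
--     n = len(s)
--     while i < n:
--         ch = s[i]
--         if ch == "\\" and i + 1 < n:
--             # Skip the escaped next character (covers \{, \}, \\, etc.)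
--             i += 2
--             continue
--         if ch == "{":
--             depth += 1
--         elif ch == "}":
--             depth -= 1
--             if depth == 0:
--                 return i
--         i += 1
--     return -1
--
-- def _delete_call(text: str, cmd: str) -> str:
--     """Delete every ``\\cmd[opt]{arg}`` call from ``text``.
--
--     Uses a scanner that respects balanced braces so ``\\footnote{a {b} c}``
--     is removed whole. Optional ``[...]`` arguments after the command name
--     are also consumed.
--     """
--     out: list[str] = []
--     i = 0
--     n = len(text)
--     needle = "\\" + cmd
--     nlen = len(needle)
--     while i < n:
--         if text.startswith(needle, i):
--             # Must be followed by a non-letter (so \citet doesn't match \cite).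
--             after = i + nlen
--             if after < n and text[after].isalpha():
--                 out.append(text[i])
--                 i += 1
--                 continue
--             # Skip a star suffix if the command name already includes one.
--             # Skip optional [...] args.
--             j = after
--             while j < n and text[j] == "[":
--                 close = text.find("]", j)
--                 if close == -1:
--                     break
--                 j = close + 1
--             # Skip the mandatory {...} arg if present.
--             if j < n and text[j] == "{":
--                 close = _find_matching_brace(text, j)
--                 if close == -1:
--                     out.append(text[i])
--                     i += 1
--                     continue
--                 i = close + 1
--             else:
--                 # No arg — just drop the command name (rare but possible).
--                 i = j
--             continue
--         out.append(text[i])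
--         i += 1
--     return "".join(out)
-- ===== SOURCE B (Python) =====
-- def _find_matching_brace(s: str, open_pos: int) -> int:
--     """Return the index of the matching ``}`` for a ``{`` at ``open_pos``."""
--     if open_pos >= len(s) or s[open_pos] != "{":
--         return -1
--     depth = 1
--     i = open_pos + 1
--     n = len(s)
--     while i < n:
--         ch = s[i]
--         if ch == "\\" and i + 1 < n:
--             i += 2
--             continue
--         if ch == "{":
--             depth += 1
--         elif ch == "}":
--             depth -= 1
--             if depth == 0:
--                 return i
--         i += 1
--     return -1
--
--
-- def _match_end(text: str, cmd: str, pos: int):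
--     """Index just past a complete \\cmd call starting at pos, or None."""
--     needle = "\\" + cmd
--     if not text.startswith(needle, pos):
--         return None
--     n = len(text)
--     j = pos + len(needle)
--     if j < n and text[j].isalpha():
--         return None
--     while j < n and text[j] == "[":
--         close = text.find("]", j)
--         if close == -1:
--             break
--         j = close + 1
--     if j < n and text[j] == "{":
--         close = _find_matching_brace(text, j)
--         return None if close == -1 else close + 1
--     return j
--
--
-- def _delete_call(text: str, cmd: str) -> str:
--     # Two phases: collect the [start, end) spans of complete \cmd calls,
--     # then stitch the text back together from the gaps between the spans.
--     spans = []
--     i = 0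
--     n = len(text)
--     while i < n:
--         end = _match_end(text, cmd, i)
--         if end is None:
--             i += 1
--         else:
--             spans.append((i, end))
--             i = end
--     parts = []
--     prev = 0
--     for a, b in spans:
--         parts.append(text[prev:a])
--         prev = b
--     parts.append(text[prev:])
--     return "".join(parts)
-- ===== Notes on version B (the rewrite author's own statement) =====
-- stated objective: alternative
-- what changed: A deletes calls in one copy-as-you-scan pass that appends kept characters one by one; B is a two-phase algorithm: a first pass collects the [start,end) spans of complete \cmd calls via a _match_end helper, and a second pass stitches the result from the slices between consecutive spans.
import Mathlib
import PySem

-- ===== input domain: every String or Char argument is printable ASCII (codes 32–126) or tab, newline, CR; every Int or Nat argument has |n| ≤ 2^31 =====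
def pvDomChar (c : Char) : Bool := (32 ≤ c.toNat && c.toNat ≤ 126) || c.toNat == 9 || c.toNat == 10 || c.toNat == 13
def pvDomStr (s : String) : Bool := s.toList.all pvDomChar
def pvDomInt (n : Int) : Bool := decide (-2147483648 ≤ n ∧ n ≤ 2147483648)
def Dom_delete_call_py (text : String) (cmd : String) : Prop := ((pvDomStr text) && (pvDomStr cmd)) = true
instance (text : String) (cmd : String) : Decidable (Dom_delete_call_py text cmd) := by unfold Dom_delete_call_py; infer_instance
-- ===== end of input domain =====

-- B replaces A's single copy-as-you-scan loop by a two-phase algorithm: first collect the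
-- [start,end) spans of complete \cmd calls, then stitch the text from the gaps. Objective: alternative.
-- Loops are ported as structural recursion on a fuel counter that is always large enough
-- (every loop strictly increases its index, bounded by the text length), a totality guard only.

-- ===== PORT A =====
-- helper _find_matching_brace (module helper, called by both A's and B's Python):
-- its while-loop, as recursion on the scan index i (fuel ≥ n - i suffices: i strictly increases)
def fmbLoop (s : List Char) : Nat → Nat → Nat → Int
  | 0, _, _ => -1
  | fuel + 1, depth, i =>
    if i < s.length then
      if s.getD i ' ' = '\\' ∧ i + 1 < s.length then
        fmbLoop s fuel depth (i + 2)
      else if s.getD i ' ' = '{' then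
        fmbLoop s fuel (depth + 1) (i + 1)
      else if s.getD i ' ' = '}' then
        if depth = 1 then (i : Int) else fmbLoop s fuel (depth - 1) (i + 1)
      else
        fmbLoop s fuel depth (i + 1)
    else -1

def findMatchingBrace (s : List Char) (openPos : Nat) : Int :=
  if s.length ≤ openPos ∨ ¬ s.getD openPos ' ' = '{' then -1
  else fmbLoop s s.length 1 (openPos + 1)

-- the `while j < n and text[j] == "[": …` loop, inline in BOTH Pythons (A's _delete_call and
-- B's _match_end contain the same four lines); ported once (fuel ≥ n + 1 - j suffices)
def skipOpts (s : List Char) : Nat → Nat → Nat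
  | 0, j => j
  | fuel + 1, j =>
    if j < s.length ∧ s.getD j ' ' = '[' then
      if PySem.Chars.findFrom s [']'] (j : Int) none = -1 then j
      else skipOpts s fuel ((PySem.Chars.findFrom s [']'] (j : Int) none).toNat + 1)
    else j

-- A's single while-loop: test the needle at every index, copy one kept character at a time
def daLoop (text : List Char) (cmd : List Char) : Nat → Nat → List Char
  | 0, _ => []
  | fuel + 1, i =>
    if i < text.length then
      -- text.startswith(needle, i), needle = "\" + cmd
      if PySem.Chars.startswith (text.drop i) ('\\' :: cmd) then
        -- after = i + nlen; false match if text[after].isalpha()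
        if i + ('\\' :: cmd).length < text.length ∧
            PySem.Chars.isalpha (text.getD (i + ('\\' :: cmd).length) ' ') then
          text.getD i ' ' :: daLoop text cmd fuel (i + 1)
        else
          -- j = index after the optional [...] groups
          if skipOpts text (text.length + 1) (i + ('\\' :: cmd).length) < text.length ∧
              text.getD (skipOpts text (text.length + 1) (i + ('\\' :: cmd).length)) ' ' = '{' then
            if findMatchingBrace text (skipOpts text (text.length + 1) (i + ('\\' :: cmd).length)) = -1 then
              text.getD i ' ' :: daLoop text cmd fuel (i + 1)
            else
              daLoop text cmd fuel
                ((findMatchingBrace text (skipOpts text (text.length + 1) (i + ('\\' :: cmd).length))).toNat + 1)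
          else
            daLoop text cmd fuel (skipOpts text (text.length + 1) (i + ('\\' :: cmd).length))
      else
        text.getD i ' ' :: daLoop text cmd fuel (i + 1)
    else []

def delete_call_py (text : String) (cmd : String) : String :=
  String.ofList (daLoop text.toList cmd.toList (text.toList.length + 1) 0)

-- ===== PORT B =====
-- B's helper _match_end: index just past a complete \cmd call starting at pos, or none
def matchEnd (text : List Char) (cmd : List Char) (pos : Nat) : Option Nat :=
  if PySem.Chars.startswith (text.drop pos) ('\\' :: cmd) then
    if pos + ('\\' :: cmd).length < text.length ∧
        PySem.Chars.isalpha (text.getD (pos + ('\\' :: cmd).length) ' ') then none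
    else
      -- j = skipOpts …: _match_end's inline `while j < n and text[j] == "[": …` loop
      if skipOpts text (text.length + 1) (pos + ('\\' :: cmd).length) < text.length ∧
          text.getD (skipOpts text (text.length + 1) (pos + ('\\' :: cmd).length)) ' ' = '{' then
        if findMatchingBrace text (skipOpts text (text.length + 1) (pos + ('\\' :: cmd).length)) = -1 then none
        else some ((findMatchingBrace text (skipOpts text (text.length + 1) (pos + ('\\' :: cmd).length))).toNat + 1)
      else some (skipOpts text (text.length + 1) (pos + ('\\' :: cmd).length))
  else none

-- phase 1: collect the [start, end) spans of complete \cmd calls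
def ivLoop (text : List Char) (cmd : List Char) : Nat → Nat → List (Nat × Nat)
  | 0, _ => []
  | fuel + 1, i =>
    if i < text.length then
      match matchEnd text cmd i with
      | none => ivLoop text cmd fuel (i + 1)
      | some e => (i, e) :: ivLoop text cmd fuel e
    else []

-- phase 2: stitch the text back together from the gaps between spans
def stitch (text : List Char) (spans : List (Nat × Nat)) : List Char :=
  let p := spans.foldl
    (fun (st : List Char × Nat) ab =>
      (st.1 ++ PySem.List.slice text (some (st.2 : Int)) (some (ab.1 : Int)), ab.2))
    ([], 0)
  p.1 ++ PySem.List.slice text (some (p.2 : Int)) none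

def delete_call_py_alt (text : String) (cmd : String) : String :=
  String.ofList (stitch text.toList (ivLoop text.toList cmd.toList (text.toList.length + 1) 0))

-- ===== PRECONDITION & SPEC =====
def Spec_delete_call_py (text : String) (cmd : String) (out : String) : Prop := out = delete_call_py_alt text cmd
instance (text : String) (cmd : String) (out : String) : Decidable (Spec_delete_call_py text cmd out) := by unfold Spec_delete_call_py; infer_instance

-- ===== CLAIM (what is proved, stated in full; the proofs are below) =====
def Claim_equal_delete_call_py : Prop := ∀ (text : String) (cmd : String), Dom_delete_call_py text cmd → Spec_delete_call_py text cmd (delete_call_py text cmd)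

-- ===== LEMMAS AND PROOFS =====

-- fmbLoop's result, when not -1, is an index in [i, length)
theorem fmbLoop_bounds (s : List Char) :
    ∀ fuel depth i, fmbLoop s fuel depth i ≠ -1 →
      (i : Int) ≤ fmbLoop s fuel depth i ∧ fmbLoop s fuel depth i < s.length := by
  intro fuel
  induction fuel with
  | zero => intro depth i h; simp [fmbLoop] at h
  | succ fuel ih =>
    intro depth i h
    simp only [fmbLoop] at h ⊢
    split_ifs at h ⊢ with h0 h1 h2 h3 h4
    · have := ih depth (i + 2) h; omega
    · have := ih (depth + 1) (i + 1) h; omega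
    · omega
    · have := ih (depth - 1) (i + 1) h; omega
    · have := ih depth (i + 1) h; omega
    · exact absurd rfl h

theorem findMatchingBrace_bounds (s : List Char) (j : Nat) (h : findMatchingBrace s j ≠ -1) :
    (j : Int) < findMatchingBrace s j ∧ findMatchingBrace s j < s.length := by
  unfold findMatchingBrace at h ⊢
  split_ifs at h ⊢ with hcond
  · exact absurd rfl h
  · have hb := fmbLoop_bounds s s.length 1 (j + 1) h
    have h1 := hb.1
    push_cast at h1
    exact ⟨by omega, hb.2⟩

-- the [...]-skipping loop never moves j backwards
theorem skipOpts_ge (s : List Char) :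
    ∀ fuel j, j ≤ skipOpts s fuel j := by
  intro fuel
  induction fuel with
  | zero => intro j; simp [skipOpts]
  | succ fuel ih =>
    intro j
    simp only [skipOpts]
    split_ifs with h hc
    · exact le_refl j
    · have h1 := (PySem.Chars.findFrom_natCast_spec s [']'] j (le_of_lt h.1) hc).1
      have h2 := ih ((PySem.Chars.findFrom s [']'] (j : Int) none).toNat + 1)
      omega
    · exact le_refl j

-- and never past the end of the text
theorem skipOpts_le (s : List Char) :
    ∀ fuel j, j ≤ s.length → skipOpts s fuel j ≤ s.length := by
  intro fuel
  induction fuel with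
  | zero => intro j hj; simpa [skipOpts] using hj
  | succ fuel ih =>
    intro j hj
    simp only [skipOpts]
    split_ifs with h hc
    · exact hj
    · have hs := PySem.Chars.findFrom_natCast_spec s [']'] j (le_of_lt h.1) hc
      have h1 := hs.1
      have h2 := hs.2.1.length_le
      simp only [List.length_cons, List.length_nil, List.length_drop] at h2
      exact ih _ (by omega)
    · exact hj

-- a successful match ends strictly after pos and within the text
theorem matchEnd_bounds (text cmd : List Char) (pos : Nat) (e : Nat)
    (h : matchEnd text cmd pos = some e) : pos < e ∧ e ≤ text.length := by
  unfold matchEnd at h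
  by_cases hsw : PySem.Chars.startswith (text.drop pos) ('\\' :: cmd) = true
  case neg => rw [if_neg hsw] at h; exact absurd h (by simp)
  case pos =>
    rw [if_pos hsw] at h
    have hpref := (PySem.Chars.startswith_iff _ _).mp hsw
    have hlen := hpref.length_le
    simp only [List.length_cons, List.length_drop] at hlen
    have hg := skipOpts_ge text (text.length + 1) (pos + ('\\' :: cmd).length)
    have hl := skipOpts_le text (text.length + 1) (pos + ('\\' :: cmd).length)
      (by simp only [List.length_cons] at *; omega)
    by_cases h2 : pos + ('\\' :: cmd).length < text.length ∧
        PySem.Chars.isalpha (text.getD (pos + ('\\' :: cmd).length) ' ')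
    · rw [if_pos h2] at h; exact absurd h (by simp)
    · rw [if_neg h2] at h
      by_cases h3 : skipOpts text (text.length + 1) (pos + ('\\' :: cmd).length) < text.length ∧
          text.getD (skipOpts text (text.length + 1) (pos + ('\\' :: cmd).length)) ' ' = '{'
      · rw [if_pos h3] at h
        by_cases h4 : findMatchingBrace text (skipOpts text (text.length + 1) (pos + ('\\' :: cmd).length)) = -1
        · rw [if_pos h4] at h; exact absurd h (by simp)
        · rw [if_neg h4] at h
          have hb := findMatchingBrace_bounds text _ h4
          have hb1 := hb.1
          have hb2 := hb.2
          simp only [Option.some.injEq] at h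
          subst h
          constructor
          · simp only [List.length_cons] at *; omega
          · omega
      · rw [if_neg h3] at h
        simp only [Option.some.injEq] at h
        subst h
        constructor
        · simp only [List.length_cons] at *; omega
        · exact hl

-- recursive rendering of the gaps, the proof-side view of `stitch`
def renderFrom (text : List Char) (i : Nat) : List (Nat × Nat) → List Char
  | [] => text.drop i
  | (a, _b) :: rest => (text.drop i).take (a - i) ++ renderFrom text _b rest

theorem slice_nat_eq (text : List Char) (p a : Nat) :
    PySem.List.slice text (some (p : Int)) (some (a : Int)) = (text.drop p).take (a - p) := by
  rw [PySem.List.slice_toNat text (by positivity) (by positivity)]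
  simp

theorem stitch_fold (text : List Char) :
    ∀ (spans : List (Nat × Nat)) (acc : List Char) (prev : Nat),
      (spans.foldl
          (fun (st : List Char × Nat) ab =>
            (st.1 ++ PySem.List.slice text (some (st.2 : Int)) (some (ab.1 : Int)), ab.2))
          (acc, prev)).1 ++
        PySem.List.slice text
          (some (((spans.foldl
            (fun (st : List Char × Nat) ab =>
              (st.1 ++ PySem.List.slice text (some (st.2 : Int)) (some (ab.1 : Int)), ab.2))
            (acc, prev)).2 : Nat) : Int)) none
      = acc ++ renderFrom text prev spans := by
  intro spans
  induction spans with
  | nil =>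
    intro acc prev
    simp [renderFrom, PySem.List.slice_from_natCast]
  | cons ab rest ih =>
    intro acc prev
    obtain ⟨a, b⟩ := ab
    simp only [List.foldl_cons]
    rw [ih (acc ++ PySem.List.slice text (some (prev : Int)) (some (a : Int))) b]
    rw [slice_nat_eq, renderFrom, List.append_assoc]

theorem stitch_eq_renderFrom (text : List Char) (spans : List (Nat × Nat)) :
    stitch text spans = renderFrom text 0 spans := by
  unfold stitch
  simpa using stitch_fold text spans [] 0

-- the first span produced from index j starts at or after j
theorem ivLoop_head_ge (text cmd : List Char) :
    ∀ fuel j a b rest, ivLoop text cmd fuel j = (a, b) :: rest → j ≤ a := by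
  intro fuel
  induction fuel with
  | zero => intro j a b rest h; simp [ivLoop] at h
  | succ fuel ih =>
    intro j a b rest h
    simp only [ivLoop] at h
    by_cases hn : j < text.length
    · simp only [if_pos hn] at h
      split at h
      · have := ih (j + 1) a b rest h; omega
      · simp only [List.cons.injEq, Prod.mk.injEq] at h
        omega
    · simp [if_neg hn] at h

-- A takes its copy-one-char branch exactly when _match_end reports no match
theorem daLoop_none (text cmd : List Char) (fuel i : Nat) (hn : i < text.length)
    (h : matchEnd text cmd i = none) :
    daLoop text cmd (fuel + 1) i = text.getD i ' ' :: daLoop text cmd fuel (i + 1) := by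
  unfold matchEnd at h
  simp only [daLoop, if_pos hn]
  by_cases hsw : PySem.Chars.startswith (text.drop i) ('\\' :: cmd) = true
  case neg => rw [if_neg hsw]
  case pos =>
    rw [if_pos hsw] at h ⊢
    by_cases h2 : i + ('\\' :: cmd).length < text.length ∧
        PySem.Chars.isalpha (text.getD (i + ('\\' :: cmd).length) ' ')
    · rw [if_pos h2]
    · rw [if_neg h2] at h ⊢
      by_cases h3 : skipOpts text (text.length + 1) (i + ('\\' :: cmd).length) < text.length ∧
          text.getD (skipOpts text (text.length + 1) (i + ('\\' :: cmd).length)) ' ' = '{'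
      · rw [if_pos h3] at h ⊢
        by_cases h4 : findMatchingBrace text (skipOpts text (text.length + 1) (i + ('\\' :: cmd).length)) = -1
        · rw [if_pos h4]
        · rw [if_neg h4] at h; exact absurd h (by simp)
      · rw [if_neg h3] at h; exact absurd h (by simp)

-- A jumps to exactly the end _match_end reports on a match
theorem daLoop_some (text cmd : List Char) (fuel i e : Nat) (hn : i < text.length)
    (h : matchEnd text cmd i = some e) :
    daLoop text cmd (fuel + 1) i = daLoop text cmd fuel e := by
  unfold matchEnd at h
  simp only [daLoop, if_pos hn]
  by_cases hsw : PySem.Chars.startswith (text.drop i) ('\\' :: cmd) = true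
  case neg => rw [if_neg hsw] at h; exact absurd h (by simp)
  case pos =>
    rw [if_pos hsw] at h ⊢
    by_cases h2 : i + ('\\' :: cmd).length < text.length ∧
        PySem.Chars.isalpha (text.getD (i + ('\\' :: cmd).length) ' ')
    · rw [if_pos h2] at h; exact absurd h (by simp)
    · rw [if_neg h2] at h ⊢
      by_cases h3 : skipOpts text (text.length + 1) (i + ('\\' :: cmd).length) < text.length ∧
          text.getD (skipOpts text (text.length + 1) (i + ('\\' :: cmd).length)) ' ' = '{'
      · rw [if_pos h3] at h ⊢
        by_cases h4 : findMatchingBrace text (skipOpts text (text.length + 1) (i + ('\\' :: cmd).length)) = -1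
        · rw [if_pos h4] at h; exact absurd h (by simp)
        · rw [if_neg h4] at h ⊢
          simp only [Option.some.injEq] at h
          rw [h]
      · rw [if_neg h3] at h ⊢
        simp only [Option.some.injEq] at h
        rw [h]

-- the central equivalence: A's scanner emits exactly the gaps between B's spans
theorem main_aux (text cmd : List Char) :
    ∀ fuel i, text.length - i < fuel → i ≤ text.length →
      daLoop text cmd fuel i = renderFrom text i (ivLoop text cmd fuel i) := by
  intro fuel
  induction fuel with
  | zero => intro i hf hle; omega
  | succ fuel ih =>
    intro i hf hle
    by_cases hn : i < text.length
    · simp only [ivLoop, if_pos hn]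
      cases hme : matchEnd text cmd i with
      | none =>
        rw [daLoop_none text cmd fuel i hn hme]
        rw [ih (i + 1) (by omega) (by omega)]
        cases hiv : ivLoop text cmd fuel (i + 1) with
        | nil =>
          simp only [renderFrom]
          rw [List.drop_eq_getElem_cons hn, List.getD_eq_getElem text ' ' hn]
        | cons ab rest =>
          obtain ⟨a, b⟩ := ab
          have hga := ivLoop_head_ge text cmd fuel (i + 1) a b rest hiv
          simp only [renderFrom]
          rw [List.drop_eq_getElem_cons hn, List.getD_eq_getElem text ' ' hn]
          have : a - i = (a - (i + 1)) + 1 := by omega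
          rw [this, List.take_succ_cons]
          simp
      | some e =>
        have hb := matchEnd_bounds text cmd i e hme
        rw [daLoop_some text cmd fuel i e hn hme]
        rw [ih e (by omega) hb.2]
        simp [renderFrom]
    · simp only [daLoop, ivLoop, if_neg hn]
      simp only [renderFrom]
      exact (List.drop_eq_nil_of_le (by omega)).symm

-- ===== VERDICT (by name: the statement is the Claim_ definition above) =====
theorem delete_call_py_spec : Claim_equal_delete_call_py := by
  intro text cmd _
  unfold Spec_delete_call_py delete_call_py delete_call_py_alt
  rw [stitch_eq_renderFrom]
  rw [main_aux text.toList cmd.toList (text.toList.length + 1) 0 (by omega) (by omega)]
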